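-- pv_equiv track=rewrite | github.com/ikokkari/PythonProblems | labs109.py | hitting_integer_powers
-- ===== SOURCE A (Python) =====
-- def hitting_integer_powers(a, b, t=100):
--     pa, pb, aa, bb = 1, 1, a, b
--     while t * abs(aa - bb) > min(aa, bb):
--         if aa < bb:
--             aa = aa * a
--             pa += 1
--         else:
--             bb = bb * b
--             pb += 1
--     return pa, pb
-- ===== SOURCE B (Python) =====
-- def hitting_integer_powers(a, b, t=100):
--     # Batched phases: each phase jumps the smaller power directly to the first
--     # exponent where the loop would stop or the branch would switch, using an
--     # integer ceiling-division threshold and an integer-log inner loop on the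
--     # (much smaller) ratio, instead of one big-int multiplication per step.
--     pa, pb, aa, bb = 1, 1, a, b
--     while t * abs(aa - bb) > min(aa, bb):
--         if aa < bb:
--             q = -((-(t * bb)) // ((t + 1) * aa))
--             acc, k = 1, 0
--             while acc < q:
--                 acc *= a
--                 k += 1
--             aa *= acc
--             pa += k
--         else:
--             q = -((-(t * aa)) // ((t + 1) * bb))
--             acc, k = 1, 0
--             while acc < q:
--                 acc *= b
--                 k += 1
--             bb *= acc
--             pb += k
--     return pa, pb
-- ===== Notes on version B (the rewrite author's own statement) =====
-- stated objective: alternative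
-- what changed: B replaces A's one-multiplication-per-step loop with Euclid-style phases: each phase computes the integer ceiling threshold t*other//((t+1)*smaller), finds the run length k by an integer-log loop on small numbers, and jumps the smaller power k exponents with one big multiplication.
-- outside the precondition, e.g. on hitting_integer_powers(-2, -2, 5): A returns (2, 2), B does not finish within the time limit
import Mathlib
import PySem

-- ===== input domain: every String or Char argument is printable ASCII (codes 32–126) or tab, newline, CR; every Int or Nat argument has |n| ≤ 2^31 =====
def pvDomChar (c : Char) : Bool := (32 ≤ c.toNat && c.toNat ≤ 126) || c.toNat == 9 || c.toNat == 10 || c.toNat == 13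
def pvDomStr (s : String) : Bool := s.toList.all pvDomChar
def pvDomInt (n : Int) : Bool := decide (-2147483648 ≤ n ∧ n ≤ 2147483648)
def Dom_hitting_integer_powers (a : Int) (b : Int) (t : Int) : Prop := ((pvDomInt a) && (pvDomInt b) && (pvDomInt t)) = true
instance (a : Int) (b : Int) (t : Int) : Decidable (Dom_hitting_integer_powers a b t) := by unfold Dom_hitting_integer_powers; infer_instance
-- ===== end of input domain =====

-- B batches each same-base run of A's loop into one phase (ceiling-division threshold +
-- integer-log inner loop + one big multiplication); alternative structure, not claimed faster.
-- Fuel (2^64) only makes the loops total in Lean; inside Pre_ it is never exhausted in the proof,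
-- which holds for every fuel value.

-- ===== PORT A =====
-- step-by-step loop of A; fuel = remaining loop iterations (totality guard only)
def pvHipA (fuel : Nat) (a b t pa pb aa bb : Int) : Int × Int :=
  match fuel with
  | 0 => (pa, pb)
  | n+1 =>
    if t * |aa - bb| > min aa bb then
      if aa < bb then pvHipA n a b t (pa + 1) pb (aa * a) bb
      else pvHipA n a b t pa (pb + 1) aa (bb * b)
    else (pa, pb)

def pvFuel : Nat := 2 ^ 64

def hitting_integer_powers (a : Int) (b : Int) (t : Int) : Int × Int :=
  pvHipA pvFuel a b t 1 1 a b

-- ===== PORT B =====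
-- inner loop of B:  while acc < q: acc *= base; k += 1   (fuel = totality guard)
def pvILog (fuel : Nat) (base q acc : Int) (k : Nat) : Nat × Int :=
  match fuel with
  | 0 => (k, acc)
  | m+1 => if acc < q then pvILog m base q (acc * base) (k + 1) else (k, acc)

-- outer loop of B; fuel counts A-steps, a phase of k steps consumes k fuel
def pvHipB (fuel : Nat) (a b t pa pb aa bb : Int) : Int × Int :=
  match fuel with
  | 0 => (pa, pb)
  | n+1 =>
    if t * |aa - bb| > min aa bb then
      if aa < bb then
        let q := -(PySem.Int.floordiv (-(t * bb)) ((t + 1) * aa))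
        let r := pvILog (n + 1) a q 1 0
        pvHipB (n - (r.1 - 1)) a b t (pa + (r.1 : Int)) pb (aa * r.2) bb
      else
        let q := -(PySem.Int.floordiv (-(t * aa)) ((t + 1) * bb))
        let r := pvILog (n + 1) b q 1 0
        pvHipB (n - (r.1 - 1)) a b t pa (pb + (r.1 : Int)) aa (bb * r.2)
    else (pa, pb)
  termination_by fuel
  decreasing_by all_goals omega

def hitting_integer_powers_alt (a : Int) (b : Int) (t : Int) : Int × Int :=
  pvHipB pvFuel a b t 1 1 a b

-- ===== PRECONDITION & SPEC =====
-- Pre_ excludes degenerate inputs (a < 2, b < 2 or t < 1) whose loop does not exit at the very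
-- first test: there Python A diverges or (for some negative bases) returns a value by accident of
-- sign alternation, while B's batching inner loop itself diverges.
def Pre_hitting_integer_powers (a : Int) (b : Int) (t : Int) : Prop :=
  (2 ≤ a ∧ 2 ≤ b ∧ 1 ≤ t) ∨ t * |a - b| ≤ min a b
instance (a : Int) (b : Int) (t : Int) : Decidable (Pre_hitting_integer_powers a b t) := by
  unfold Pre_hitting_integer_powers; infer_instance

def pvWitness_hitting_integer_powers : Int × Int × Int := (2, 3, 100)

def Spec_hitting_integer_powers (a : Int) (b : Int) (t : Int) (out : Int × Int) : Prop := out = hitting_integer_powers_alt a b t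
instance (a : Int) (b : Int) (t : Int) (out : Int × Int) : Decidable (Spec_hitting_integer_powers a b t out) := by unfold Spec_hitting_integer_powers; infer_instance

-- ===== CLAIM (what is proved, stated in full; the proofs are below) =====
def Claim_equal_hitting_integer_powers : Prop := ∀ (a : Int) (b : Int) (t : Int), Dom_hitting_integer_powers a b t → Pre_hitting_integer_powers a b t → Spec_hitting_integer_powers a b t (hitting_integer_powers a b t)

-- ===== LEMMAS AND PROOFS =====

-- acc advance: the k-offset of pvILog is additive
theorem pvILog_offset (m : Nat) (base q : Int) :
    ∀ (acc : Int) (k : Nat), pvILog m base q acc k = ((pvILog m base q acc 0).1 + k, (pvILog m base q acc 0).2) := by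
  induction m with
  | zero => intro acc k; simp [pvILog]
  | succ m ih =>
    intro acc k
    by_cases h : acc < q
    · simp only [pvILog, if_pos h]
      rw [ih (acc * base) (k + 1), ih (acc * base) 1]
      refine Prod.ext (by simp; omega) (by simp)
  -- not taken branch
    · simp [pvILog, h]

-- the ceiling threshold q = -((-p) // r): y < q ↔ y*r < p  (r > 0)
theorem pvCeil_lt_iff (p r y : Int) (hr : 0 < r) :
    y < -(PySem.Int.floordiv (-p) r) ↔ y * r < p := by
  have h := PySem.Int.le_floordiv_iff_mul_le (q := -y) (a := -p) (b := r) hr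
  constructor
  · intro hy
    by_contra hc
    have : -y * r ≤ -p := by nlinarith [not_lt.mp hc]
    have := h.mpr this
    omega
  · intro hy
    have h2 : ¬ (-y * r ≤ -p) := by nlinarith
    have := fun hle => h2 (h.mp hle)
    omega

-- one a-side run: the first k multiplications of A (all in the aa-branch) equal one pvILog phase
theorem pvRunA (a b t aa0 bb : Int) (ha : 1 ≤ a) (ht : 1 ≤ t)
    (haa : 1 ≤ aa0) (_hbb : 1 ≤ bb) :
    ∀ (m : Nat) (acc pa pb : Int), 1 ≤ acc →
      (pvILog m a (-(PySem.Int.floordiv (-(t * bb)) ((t + 1) * aa0))) acc 0).1 ≤ m ∧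
      1 ≤ (pvILog m a (-(PySem.Int.floordiv (-(t * bb)) ((t + 1) * aa0))) acc 0).2 ∧
      pvHipA m a b t pa pb (aa0 * acc) bb =
        pvHipA (m - (pvILog m a (-(PySem.Int.floordiv (-(t * bb)) ((t + 1) * aa0))) acc 0).1)
          a b t (pa + ((pvILog m a (-(PySem.Int.floordiv (-(t * bb)) ((t + 1) * aa0))) acc 0).1 : Int))
          pb (aa0 * (pvILog m a (-(PySem.Int.floordiv (-(t * bb)) ((t + 1) * aa0))) acc 0).2) bb := by
  set q := -(PySem.Int.floordiv (-(t * bb)) ((t + 1) * aa0)) with hq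
  have hr : 0 < (t + 1) * aa0 := by nlinarith
  intro m
  induction m with
  | zero => intro acc pa pb hacc; refine ⟨le_refl _, ?_, ?_⟩ <;> simp [pvILog, hacc]
  | succ m ih =>
    intro acc pa pb hacc
    by_cases h : acc < q
    · -- loop continues: cond holds, aa-branch
      have hlt : acc * ((t + 1) * aa0) < t * bb := (pvCeil_lt_iff (t * bb) ((t + 1) * aa0) acc hr).mp h
      have haacc : 1 ≤ aa0 * acc := by nlinarith
      have hltbb : aa0 * acc < bb := by nlinarith
      have hcond : t * |aa0 * acc - bb| > min (aa0 * acc) bb := by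
        rw [abs_of_neg (by omega), min_eq_left (le_of_lt hltbb)]
        nlinarith
      have hstep : pvHipA (m + 1) a b t pa pb (aa0 * acc) bb =
          pvHipA m a b t (pa + 1) pb (aa0 * (acc * a)) bb := by
        rw [show aa0 * (acc * a) = aa0 * acc * a by ring]
        simp [pvHipA, hcond, hltbb]
      have hil : pvILog (m + 1) a q acc 0 =
          ((pvILog m a q (acc * a) 0).1 + 1, (pvILog m a q (acc * a) 0).2) := by
        simp only [pvILog, if_pos h]
        exact pvILog_offset m a q (acc * a) 1
      obtain ⟨hk, hacc', heq⟩ := ih (acc * a) (pa + 1) pb (by nlinarith)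
      rw [hil]
      refine ⟨by omega, hacc', ?_⟩
      rw [hstep, heq]
      have hfuel : (m + 1) - ((pvILog m a q (acc * a) 0).1 + 1) = m - (pvILog m a q (acc * a) 0).1 := by omega
      rw [hfuel]
      congr 1
      push_cast; ring
    · -- inner loop stops here
      have : pvILog (m + 1) a q acc 0 = (0, acc) := by simp [pvILog, h]
      rw [this]
      exact ⟨by omega, hacc, by simp⟩

-- one b-side run, symmetric
theorem pvRunB (a b t aa bb0 : Int) (hb : 1 ≤ b) (ht : 1 ≤ t)
    (_haa : 1 ≤ aa) (hbb : 1 ≤ bb0) :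
    ∀ (m : Nat) (acc pa pb : Int), 1 ≤ acc →
      (pvILog m b (-(PySem.Int.floordiv (-(t * aa)) ((t + 1) * bb0))) acc 0).1 ≤ m ∧
      1 ≤ (pvILog m b (-(PySem.Int.floordiv (-(t * aa)) ((t + 1) * bb0))) acc 0).2 ∧
      pvHipA m a b t pa pb aa (bb0 * acc) =
        pvHipA (m - (pvILog m b (-(PySem.Int.floordiv (-(t * aa)) ((t + 1) * bb0))) acc 0).1)
          a b t pa (pb + ((pvILog m b (-(PySem.Int.floordiv (-(t * aa)) ((t + 1) * bb0))) acc 0).1 : Int))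
          aa (bb0 * (pvILog m b (-(PySem.Int.floordiv (-(t * aa)) ((t + 1) * bb0))) acc 0).2) := by
  set q := -(PySem.Int.floordiv (-(t * aa)) ((t + 1) * bb0)) with hq
  have hr : 0 < (t + 1) * bb0 := by nlinarith
  intro m
  induction m with
  | zero => intro acc pa pb hacc; refine ⟨le_refl _, ?_, ?_⟩ <;> simp [pvILog, hacc]
  | succ m ih =>
    intro acc pa pb hacc
    by_cases h : acc < q
    · have hlt : acc * ((t + 1) * bb0) < t * aa := (pvCeil_lt_iff (t * aa) ((t + 1) * bb0) acc hr).mp h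
      have hbacc : 1 ≤ bb0 * acc := by nlinarith
      have hltaa : bb0 * acc < aa := by nlinarith
      have hnotlt : ¬ aa < bb0 * acc := by omega
      have hcond : t * |aa - bb0 * acc| > min aa (bb0 * acc) := by
        rw [abs_of_pos (by omega), min_eq_right (le_of_lt hltaa)]
        nlinarith
      have hstep : pvHipA (m + 1) a b t pa pb aa (bb0 * acc) =
          pvHipA m a b t pa (pb + 1) aa (bb0 * (acc * b)) := by
        rw [show bb0 * (acc * b) = bb0 * acc * b by ring]
        simp [pvHipA, hcond, hnotlt]
      have hil : pvILog (m + 1) b q acc 0 =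
          ((pvILog m b q (acc * b) 0).1 + 1, (pvILog m b q (acc * b) 0).2) := by
        simp only [pvILog, if_pos h]
        exact pvILog_offset m b q (acc * b) 1
      obtain ⟨hk, hacc', heq⟩ := ih (acc * b) pa (pb + 1) (by nlinarith)
      rw [hil]
      refine ⟨by omega, hacc', ?_⟩
      rw [hstep, heq]
      have hfuel : (m + 1) - ((pvILog m b q (acc * b) 0).1 + 1) = m - (pvILog m b q (acc * b) 0).1 := by omega
      rw [hfuel]
      congr 1
      push_cast; ring
    · have : pvILog (m + 1) b q acc 0 = (0, acc) := by simp [pvILog, h]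
      rw [this]
      exact ⟨by omega, hacc, by simp⟩

-- main invariant: for every fuel, the two fueled loops agree in the nice regime
theorem pvMain (a b t : Int) (ha : 2 ≤ a) (hb : 2 ≤ b) (ht : 1 ≤ t) :
    ∀ (n : Nat) (pa pb aa bb : Int), 1 ≤ aa → 1 ≤ bb →
      pvHipA n a b t pa pb aa bb = pvHipB n a b t pa pb aa bb := by
  intro n
  induction n using Nat.strong_induction_on with
  | _ n IH =>
    intro pa pb aa bb haa hbb
    match n with
    | 0 => simp [pvHipA, pvHipB]
    | Nat.succ n =>
      show pvHipA (n + 1) a b t pa pb aa bb = pvHipB (n + 1) a b t pa pb aa bb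
      by_cases hcond : t * |aa - bb| > min aa bb
      · by_cases hlt : aa < bb
        · -- aa-side phase
          have hr : 0 < (t + 1) * aa := by nlinarith
          have hcl : (1 : Int) * ((t + 1) * aa) < t * bb := by
            have hc2 := hcond
            rw [abs_of_neg (by omega), min_eq_left (le_of_lt hlt)] at hc2
            nlinarith
          have h1q : (1 : Int) < -(PySem.Int.floordiv (-(t * bb)) ((t + 1) * aa)) :=
            (pvCeil_lt_iff (t * bb) ((t + 1) * aa) 1 hr).mpr hcl
          obtain ⟨hk, hacc, heq⟩ := pvRunA a b t aa bb (by omega) ht haa hbb (n + 1) 1 pa pb le_rfl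
          simp only [mul_one] at heq
          have hk1 : 1 ≤ (pvILog (n + 1) a (-(PySem.Int.floordiv (-(t * bb)) ((t + 1) * aa))) 1 0).1 := by
            have hstep1 : pvILog (n + 1) a (-(PySem.Int.floordiv (-(t * bb)) ((t + 1) * aa))) 1 0 =
                ((pvILog n a (-(PySem.Int.floordiv (-(t * bb)) ((t + 1) * aa))) (1 * a) 0).1 + 1,
                 (pvILog n a (-(PySem.Int.floordiv (-(t * bb)) ((t + 1) * aa))) (1 * a) 0).2) := by
              simp only [pvILog, if_pos h1q]
              exact pvILog_offset n a (-(PySem.Int.floordiv (-(t * bb)) ((t + 1) * aa))) (1 * a) 1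
            rw [hstep1]; simp
          have hB : pvHipB (n + 1) a b t pa pb aa bb =
              pvHipB (n - ((pvILog (n + 1) a (-(PySem.Int.floordiv (-(t * bb)) ((t + 1) * aa))) 1 0).1 - 1)) a b t
                (pa + ((pvILog (n + 1) a (-(PySem.Int.floordiv (-(t * bb)) ((t + 1) * aa))) 1 0).1 : Int)) pb
                (aa * (pvILog (n + 1) a (-(PySem.Int.floordiv (-(t * bb)) ((t + 1) * aa))) 1 0).2) bb := by
            rw [pvHipB]
            simp only [if_pos hcond, if_pos hlt]
          rw [hB, heq]
          rw [show (n + 1) - (pvILog (n + 1) a (-(PySem.Int.floordiv (-(t * bb)) ((t + 1) * aa))) 1 0).1 =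
              n - ((pvILog (n + 1) a (-(PySem.Int.floordiv (-(t * bb)) ((t + 1) * aa))) 1 0).1 - 1) from by omega]
          exact IH _ (by omega) _ _ _ _ (by nlinarith) hbb
        · -- bb-side phase
          have hr : 0 < (t + 1) * bb := by nlinarith
          have hcl : (1 : Int) * ((t + 1) * bb) < t * aa := by
            have hge : bb ≤ aa := by omega
            have hne : bb ≠ aa := by
              intro hbe
              rw [hbe] at hcond
              simp at hcond
              omega
            have hc2 := hcond
            rw [abs_of_pos (by omega), min_eq_right hge] at hc2
            nlinarith
          have h1q : (1 : Int) < -(PySem.Int.floordiv (-(t * aa)) ((t + 1) * bb)) :=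
            (pvCeil_lt_iff (t * aa) ((t + 1) * bb) 1 hr).mpr hcl
          obtain ⟨hk, hacc, heq⟩ := pvRunB a b t aa bb (by omega) ht haa hbb (n + 1) 1 pa pb le_rfl
          simp only [mul_one] at heq
          have hk1 : 1 ≤ (pvILog (n + 1) b (-(PySem.Int.floordiv (-(t * aa)) ((t + 1) * bb))) 1 0).1 := by
            have hstep1 : pvILog (n + 1) b (-(PySem.Int.floordiv (-(t * aa)) ((t + 1) * bb))) 1 0 =
                ((pvILog n b (-(PySem.Int.floordiv (-(t * aa)) ((t + 1) * bb))) (1 * b) 0).1 + 1,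
                 (pvILog n b (-(PySem.Int.floordiv (-(t * aa)) ((t + 1) * bb))) (1 * b) 0).2) := by
              simp only [pvILog, if_pos h1q]
              exact pvILog_offset n b (-(PySem.Int.floordiv (-(t * aa)) ((t + 1) * bb))) (1 * b) 1
            rw [hstep1]; simp
          have hB : pvHipB (n + 1) a b t pa pb aa bb =
              pvHipB (n - ((pvILog (n + 1) b (-(PySem.Int.floordiv (-(t * aa)) ((t + 1) * bb))) 1 0).1 - 1)) a b t
                pa (pb + ((pvILog (n + 1) b (-(PySem.Int.floordiv (-(t * aa)) ((t + 1) * bb))) 1 0).1 : Int))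
                aa (bb * (pvILog (n + 1) b (-(PySem.Int.floordiv (-(t * aa)) ((t + 1) * bb))) 1 0).2) := by
            rw [pvHipB]
            simp only [if_pos hcond, if_neg hlt]
          rw [hB, heq]
          rw [show (n + 1) - (pvILog (n + 1) b (-(PySem.Int.floordiv (-(t * aa)) ((t + 1) * bb))) 1 0).1 =
              n - ((pvILog (n + 1) b (-(PySem.Int.floordiv (-(t * aa)) ((t + 1) * bb))) 1 0).1 - 1) from by omega]
          exact IH _ (by omega) _ _ _ _ haa (by nlinarith)
      · rw [pvHipA, pvHipB]
        simp [hcond]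

-- immediate exit: if the loop condition fails at once, both return (pa, pb) for any fuel
theorem pvStop (n : Nat) (a b t pa pb aa bb : Int) (h : ¬ t * |aa - bb| > min aa bb) :
    pvHipA n a b t pa pb aa bb = (pa, pb) ∧ pvHipB n a b t pa pb aa bb = (pa, pb) := by
  match n with
  | 0 => simp [pvHipA, pvHipB]
  | Nat.succ n =>
    rw [pvHipA, pvHipB]
    simp [h]

-- ===== VERDICT (by name: the statement is the Claim_ definition above) =====
theorem hitting_integer_powers_spec : Claim_equal_hitting_integer_powers := by
  intro a b t _hdom hpre
  unfold Spec_hitting_integer_powers hitting_integer_powers hitting_integer_powers_alt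
  rcases hpre with ⟨ha, hb, ht⟩ | hstop
  · exact pvMain a b t ha hb ht pvFuel 1 1 a b (by omega) (by omega)
  · obtain ⟨hA, hB⟩ := pvStop pvFuel a b t 1 1 a b (by omega)
    rw [hA, hB]
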